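-- pv_equiv track=rewrite | github.com/artmast27/prakt-n3 | prakt n3/solution.py | count_no_three
-- ===== SOURCE A (Python) =====
-- def count_no_three(r: int) -> int:
--     if r <= 0:
--         return 0
--     A = [0]*(r+1)
--     B = [0]*(r+1)
--     A[1] = 2
--     B[1] = 0
--     for n in range(2, r+1):
--         A[n] = A[n-1] + B[n-1]
--         B[n] = A[n-1]
--     return A[r] + B[r]
-- ===== SOURCE B (Python) =====
-- def count_no_three(r: int) -> int:
--     if r <= 0:
--         return 0
--
--     def fd(n):
--         # returns (fib(n), fib(n+1)) by fast doubling
--         if n == 0: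
--             return (0, 1)
--         a, b = fd(n >> 1)
--         c = a * (2 * b - a)
--         d = a * a + b * b
--         if n & 1:
--             return (d, c + d)
--         return (c, d)
--
--     return 2 * fd(r + 1)[0]
-- ===== Notes on version B (the rewrite author's own statement) =====
-- stated objective: faster
-- what changed: Replaced the O(r) two-array DP by the closed form — twice the Fibonacci number at index r+1 — computed with fast doubling, O(log r) big-int multiplications.
import Mathlib
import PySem

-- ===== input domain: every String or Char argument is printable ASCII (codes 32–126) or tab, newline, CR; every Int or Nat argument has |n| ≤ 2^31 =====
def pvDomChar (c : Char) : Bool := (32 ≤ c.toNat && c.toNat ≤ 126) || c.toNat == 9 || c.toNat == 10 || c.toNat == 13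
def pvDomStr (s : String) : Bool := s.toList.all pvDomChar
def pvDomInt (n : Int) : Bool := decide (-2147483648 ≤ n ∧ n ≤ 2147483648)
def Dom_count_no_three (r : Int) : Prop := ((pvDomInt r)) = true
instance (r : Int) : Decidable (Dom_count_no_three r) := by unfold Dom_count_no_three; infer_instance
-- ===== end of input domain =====

-- B replaces A's linear two-array DP by the closed form (twice fib(r+1)) computed with Fibonacci fast doubling.

-- ===== PORT A =====
-- the body of A's for-loop (reads index n-1 of both lists, writes index n)
def pvStepAB (st : List Int × List Int) (n : Int) : List Int × List Int :=
  let an := PySem.List.pyGetD st.1 (n-1) 0 + PySem.List.pyGetD st.2 (n-1) 0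
  let bn := PySem.List.pyGetD st.1 (n-1) 0
  (PySem.List.pySetD st.1 n an, PySem.List.pySetD st.2 n bn)

def count_no_three (r : Int) : Int :=
  if r ≤ 0 then 0
  else
    let a0 : List Int := List.replicate (r+1).toNat 0
    let b0 : List Int := List.replicate (r+1).toNat 0
    let a1 := PySem.List.pySetD a0 1 2
    let b1 := PySem.List.pySetD b0 1 0
    let st := (PySem.List.pyRange 2 (r+1) 1).foldl pvStepAB (a1, b1)
    PySem.List.pyGetD st.1 r 0 + PySem.List.pyGetD st.2 r 0

-- ===== PORT B =====
-- fast doubling: fdAux n = (fib n, fib (n+1))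
def fdAux : Nat → Int × Int
  | 0 => (0, 1)
  | (n+1) =>
    let p := fdAux ((n+1)/2)
    let a := p.1
    let b := p.2
    let c := a * (2*b - a)
    let d := a*a + b*b
    if (n+1) % 2 = 1 then (d, c+d) else (c, d)
decreasing_by exact Nat.div_lt_self (Nat.succ_pos n) one_lt_two

def count_no_three_alt (r : Int) : Int :=
  if r ≤ 0 then 0 else 2 * (fdAux (r+1).toNat).1

-- ===== PRECONDITION & SPEC =====
def Spec_count_no_three (r : Int) (out : Int) : Prop := out = count_no_three_alt r
instance (r : Int) (out : Int) : Decidable (Spec_count_no_three r out) := by unfold Spec_count_no_three; infer_instance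

-- ===== CLAIM (what is proved, stated in full; the proofs are below) =====
def Claim_equal_count_no_three : Prop := ∀ (r : Int), Dom_count_no_three r → Spec_count_no_three r (count_no_three r)

-- ===== LEMMAS AND PROOFS =====

-- A's loop, as a function of the range's Int upper bound
def pvLoopA (N : Nat) (t : Int) : List Int × List Int :=
  (PySem.List.pyRange 2 t 1).foldl pvStepAB
    (PySem.List.pySetD (List.replicate (N+1) (0:Int)) 1 2,
     PySem.List.pySetD (List.replicate (N+1) (0:Int)) 1 0)

theorem fdAux_eq_fib (n : Nat) : fdAux n = ((Nat.fib n : Int), (Nat.fib (n+1) : Int)) := by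
  induction n using Nat.strong_induction_on with
  | _ n ih =>
    match n with
    | 0 => simp [fdAux]
    | (k+1) =>
      rw [fdAux]
      have hlt : (k+1)/2 < k+1 := Nat.div_lt_self (Nat.succ_pos k) one_lt_two
      rw [ih _ hlt]
      set m := (k+1)/2 with hm
      have hle : Nat.fib m ≤ 2 * Nat.fib (m+1) := by
        have := Nat.fib_le_fib_succ (n := m); omega
      have heven : (Nat.fib (2*m) : Int)
          = (Nat.fib m : Int) * (2 * (Nat.fib (m+1) : Int) - (Nat.fib m : Int)) := by
        have h := Nat.fib_two_mul m
        zify [hle] at h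
        linear_combination h
      have hodd : (Nat.fib (2*m+1) : Int)
          = (Nat.fib m : Int) * (Nat.fib m : Int)
            + (Nat.fib (m+1) : Int) * (Nat.fib (m+1) : Int) := by
        have h := Nat.fib_two_mul_add_one m
        zify at h
        linear_combination h
      by_cases hpar : (k+1) % 2 = 1
      · have hk : k + 1 = 2*m + 1 := by omega
        rw [if_pos hpar, hk]
        refine Prod.ext ?_ ?_
        · simpa using hodd.symm
        · show _ = (Nat.fib (2*m+1+1) : Int)
          have h2 : Nat.fib (2*m+1+1) = Nat.fib (2*m) + Nat.fib (2*m+1) := by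
            have h3 := Nat.fib_add_two (n := 2*m)
            have e : Nat.fib (2*m+1+1) = Nat.fib (2*m+2) := rfl
            omega
          rw [h2]; push_cast; rw [heven, hodd]; try ring
      · have hk : k + 1 = 2*m := by omega
        rw [if_neg hpar, hk]
        refine Prod.ext ?_ ?_
        · simpa using heven.symm
        · simpa using hodd.symm

theorem fib_succ_split (m : Nat) (h1 : 1 ≤ m) :
    Nat.fib (m+1) = Nat.fib m + Nat.fib (m-1) := by
  obtain ⟨k, rfl⟩ : ∃ k, m = k + 1 := ⟨m - 1, by omega⟩
  have h := Nat.fib_add_two (n := k)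
  have e : Nat.fib (k+1+1) = Nat.fib (k+2) := rfl
  simp only [Nat.add_sub_cancel]
  omega

-- loop invariant: after processing range(2, m+1) both lists still have length N+1 and
-- hold 2*fib m (resp. 2*fib (m-1)) at index m
theorem loopA_inv (N : Nat) (m : Nat) (h1 : 1 ≤ m) (hm : m ≤ N) :
    (pvLoopA N ((m:Int)+1)).1.length = N+1 ∧ (pvLoopA N ((m:Int)+1)).2.length = N+1 ∧
      PySem.List.pyGetD (pvLoopA N ((m:Int)+1)).1 (m:Int) 0 = 2 * (Nat.fib m : Int) ∧
      PySem.List.pyGetD (pvLoopA N ((m:Int)+1)).2 (m:Int) 0 = 2 * (Nat.fib (m-1) : Int) := by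
  induction m, h1 using Nat.le_induction with
  | base =>
    have hrange : PySem.List.pyRange 2 (((1:Nat):Int)+1) 1 = ([] : List Int) := by
      have h2 : ((1:Nat):Int)+1 = 2 := by norm_num
      rw [h2]; exact PySem.List.pyRange_one_eq_nil (by omega)
    have hloop : pvLoopA N (((1:Nat):Int)+1)
        = (PySem.List.pySetD (List.replicate (N+1) (0:Int)) ((1:Nat):Int) 2,
           PySem.List.pySetD (List.replicate (N+1) (0:Int)) ((1:Nat):Int) 0) := by
      unfold pvLoopA
      rw [hrange]
      rfl
    have hlen : (1:Nat) < (List.replicate (N+1) (0:Int)).length := by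
      simp; omega
    refine ⟨?_, ?_, ?_, ?_⟩
    · rw [hloop]; simp [PySem.List.length_pySetD]
    · rw [hloop]; simp [PySem.List.length_pySetD]
    · rw [hloop]
      rw [PySem.List.pyGetD_pySetD_natCast _ _ _ _ _ hlen]
      simp
    · rw [hloop]
      rw [PySem.List.pyGetD_pySetD_natCast _ _ _ _ _ hlen]
      simp
  | succ m h1 ih =>
    obtain ⟨ihl1, ihl2, iha, ihb⟩ := ih (by omega)
    have hcast : ((m+1:Nat):Int) = (m:Int)+1 := by push_cast; ring
    have hstep : pvLoopA N (((m+1:Nat):Int)+1) = pvStepAB (pvLoopA N ((m:Int)+1)) ((m:Int)+1) := by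
      rw [hcast]
      simp only [pvLoopA]
      rw [PySem.List.pyRange_one_succ_right (a := 2) (b := (m:Int)+1) (by omega)]
      simp [List.foldl_append]
    have hidx : (m:Int)+1-1 = (m:Int) := by ring
    have hlt1 : m + 1 < (pvLoopA N ((m:Int)+1)).1.length := by omega
    have hlt2 : m + 1 < (pvLoopA N ((m:Int)+1)).2.length := by omega
    refine ⟨?_, ?_, ?_, ?_⟩
    · rw [hstep]; simp only [pvStepAB]; rw [PySem.List.length_pySetD]; exact ihl1
    · rw [hstep]; simp only [pvStepAB]; rw [PySem.List.length_pySetD]; exact ihl2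
    · rw [hstep]
      simp only [pvStepAB, hidx]
      rw [← hcast] at hlt1 iha ihb ⊢
      rw [PySem.List.pyGetD_pySetD_natCast _ _ _ _ _ hlt1]
      rw [if_pos rfl, iha, ihb]
      rw [fib_succ_split m h1]
      push_cast; ring
    · rw [hstep]
      simp only [pvStepAB, hidx]
      rw [← hcast] at hlt2 iha ⊢
      rw [PySem.List.pyGetD_pySetD_natCast _ _ _ _ _ hlt2]
      rw [if_pos rfl, iha]
      simp

-- ===== VERDICT (by name: the statement is the Claim_ definition above) =====
theorem count_no_three_spec : Claim_equal_count_no_three := by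
  intro r _
  unfold Spec_count_no_three count_no_three count_no_three_alt
  by_cases hr : r ≤ 0
  · simp [hr]
  · simp only [if_neg hr]
    set N := r.toNat with hNdef
    have hN1 : 1 ≤ N := by omega
    have hrN : r = (N : Int) := by omega
    obtain ⟨_, _, ha, hb⟩ := loopA_inv N N hN1 (le_refl N)
    have htoNat : (r+1).toNat = N + 1 := by omega
    have hAeq : (PySem.List.pyRange 2 (r+1) 1).foldl pvStepAB
        (PySem.List.pySetD (List.replicate (r+1).toNat (0:Int)) 1 2,
         PySem.List.pySetD (List.replicate (r+1).toNat (0:Int)) 1 0)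
        = pvLoopA N ((N:Int)+1) := by
      rw [htoNat, pvLoopA, hrN]
    have htn2 : ((N:Int)+1).toNat = N+1 := by omega
    show PySem.List.pyGetD _ r 0 + PySem.List.pyGetD _ r 0 = _
    rw [hAeq, hrN, ha, hb, htn2, fdAux_eq_fib]
    rw [fib_succ_split N hN1]
    show 2 * (Nat.fib N : Int) + 2 * (Nat.fib (N-1) : Int)
        = 2 * ((Nat.fib N : Int) + (Nat.fib (N-1) : Int))
    ring
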